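-- pv_equiv track=rewrite | github.com/BaylorH/EmailAutomation | tests/standalone_test.py | derive_notifications
-- ===== SOURCE A (Python) =====
-- from typing import Dict, List, Any, Optional, Tuple
--
-- def derive_notifications(updates: List[Dict], events: List[Dict], row_data: List[str], header: List[str]) -> List[Dict]:
--     """
--     Derive what notifications WOULD fire based on AI results.
--     This mirrors the logic in processing.py.
--     """
--     notifications = []
--
--     # Each update triggers a sheet_update notification
--     for update in updates:
--         notifications.append({
--             "kind": "sheet_update",
--             "column": update.get("column"),
--             "value": update.get("value")
--         })
--
--     # Process events
--     for event in events:
--         event_type = event.get("type")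
--
--         if event_type == "call_requested":
--             notifications.append({
--                 "kind": "action_needed",
--                 "reason": "call_requested"
--             })
--
--         elif event_type == "needs_user_input":
--             reason = event.get("reason", "unclear")
--             notifications.append({
--                 "kind": "action_needed",
--                 "reason": f"needs_user_input:{reason}"
--             })
--
--         elif event_type == "property_unavailable":
--             notifications.append({
--                 "kind": "property_unavailable"
--             })
--
--         elif event_type == "new_property":
--             notifications.append({
--                 "kind": "action_needed",
--                 "reason": "new_property_pending_send"
--             })
--
--         elif event_type == "contact_optout":
--             reason = event.get("reason", "not_interested")
--             notifications.append({
--                 "kind": "action_needed",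
--                 "reason": f"contact_optout:{reason}"
--             })
--
--         elif event_type == "wrong_contact":
--             reason = event.get("reason", "wrong_person")
--             notifications.append({
--                 "kind": "action_needed",
--                 "reason": f"wrong_contact:{reason}"
--             })
--
--         elif event_type == "tour_requested":
--             notifications.append({
--                 "kind": "action_needed",
--                 "reason": "tour_requested"
--             })
--
--         elif event_type == "close_conversation":
--             notifications.append({
--                 "kind": "conversation_closed",
--                 "reason": "natural_end"
--             })
--
--         elif event_type == "property_issue":
--             severity = event.get("severity", "major")
--             notifications.append({
--                 "kind": "action_needed",
--                 "reason": f"property_issue:{severity}"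
--             })
--
--     # Check if all required fields would be complete after updates
--     # Build current + updated values
--     idx_map = {h.lower(): i for i, h in enumerate(header) if h}
--     current_values = {h.lower(): row_data[i] if i < len(row_data) else "" for h, i in idx_map.items()}
--
--     # Apply updates
--     for update in updates:
--         col = update.get("column", "").lower()
--         val = update.get("value", "")
--         if col:
--             current_values[col] = val
--
--     # Check required fields
--     required = ["total sf", "ops ex /sf", "drive ins", "docks", "ceiling ht", "power"]
--     all_complete = all(current_values.get(f, "").strip() for f in required)
--
--     if all_complete and updates:  # Only fire if we actually made updates
--         notifications.append({
--             "kind": "row_completed"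
--         })
--
--     return notifications
-- ===== SOURCE B (Python) =====
-- from typing import Dict, List
--
-- # Dispatch table: event type -> (kind, reason base or None, optional (param key, default))
-- _EVENT_SPECS = {
--     "call_requested":       ("action_needed", "call_requested", None),
--     "needs_user_input":     ("action_needed", "needs_user_input:", ("reason", "unclear")),
--     "property_unavailable": ("property_unavailable", None, None),
--     "new_property":         ("action_needed", "new_property_pending_send", None),
--     "contact_optout":       ("action_needed", "contact_optout:", ("reason", "not_interested")),
--     "wrong_contact":        ("action_needed", "wrong_contact:", ("reason", "wrong_person")),
--     "tour_requested":       ("action_needed", "tour_requested", None),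
--     "close_conversation":   ("conversation_closed", "natural_end", None),
--     "property_issue":       ("action_needed", "property_issue:", ("severity", "major")),
-- }
--
-- _REQUIRED = ["total sf", "ops ex /sf", "drive ins", "docks", "ceiling ht", "power"]
--
--
-- def _event_notification(event):
--     spec = _EVENT_SPECS.get(event.get("type"))
--     if spec is None:
--         return None
--     kind, reason, param = spec
--     if reason is None:
--         return {"kind": kind}
--     if param is not None:
--         key, default = param
--         reason = reason + event.get(key, default)
--     return {"kind": kind, "reason": reason}
--
--
-- def _field_value(field, updates, row_data, header):
--     # last update targeting this field wins; otherwise the sheet cell under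
--     # the last matching (non-empty, case-insensitive) header; otherwise "".
--     value = None
--     for u in updates:
--         if u.get("column", "").lower() == field:
--             value = u.get("value", "")
--     if value is not None:
--         return value
--     idx = None
--     for i, h in enumerate(header):
--         if h and h.lower() == field:
--             idx = i
--     if idx is None:
--         return ""
--     return row_data[idx] if idx < len(row_data) else ""
--
--
-- def derive_notifications(updates: List[Dict], events: List[Dict], row_data: List[str], header: List[str]) -> List[Dict]:
--     notifications = [
--         {"kind": "sheet_update", "column": u.get("column"), "value": u.get("value")}
--         for u in updates
--     ]
--     for e in events:
--         n = _event_notification(e)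
--         if n is not None:
--             notifications.append(n)
--     if updates and all(_field_value(f, updates, row_data, header).strip() for f in _REQUIRED):
--         notifications.append({"kind": "row_completed"})
--     return notifications
-- ===== Notes on version B (the rewrite author's own statement) =====
-- stated objective: idiomatic
-- what changed: Replaces the nine-branch if/elif chain with a declarative dispatch table of event specs consumed by one generic builder, and replaces the idx_map/current_values dict pipeline with a direct per-required-field resolver (last matching update, else last matching header cell).
import Mathlib
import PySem

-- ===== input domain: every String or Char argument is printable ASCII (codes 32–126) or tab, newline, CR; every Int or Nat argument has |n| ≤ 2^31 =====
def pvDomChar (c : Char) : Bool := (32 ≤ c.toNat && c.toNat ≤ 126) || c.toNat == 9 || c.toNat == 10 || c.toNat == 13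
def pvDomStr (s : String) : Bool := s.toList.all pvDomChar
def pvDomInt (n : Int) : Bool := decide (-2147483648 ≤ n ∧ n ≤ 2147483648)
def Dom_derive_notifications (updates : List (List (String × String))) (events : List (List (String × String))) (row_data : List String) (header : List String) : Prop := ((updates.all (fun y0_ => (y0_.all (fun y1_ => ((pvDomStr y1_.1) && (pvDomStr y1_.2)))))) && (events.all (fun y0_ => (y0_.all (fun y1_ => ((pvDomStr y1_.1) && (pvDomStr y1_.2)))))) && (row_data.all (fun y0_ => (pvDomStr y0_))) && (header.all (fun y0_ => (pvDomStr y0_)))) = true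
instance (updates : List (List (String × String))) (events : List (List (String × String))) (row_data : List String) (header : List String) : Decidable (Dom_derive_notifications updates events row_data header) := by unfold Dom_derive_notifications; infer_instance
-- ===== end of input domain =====

-- B replaces A's nine-branch if/elif chain with a dispatch table of event specs and
-- A's idx_map/current_values dict pipeline with a direct per-required-field resolver;
-- same return value, no speed claim.


-- dict-as-association-list primitives (Python d.get(k) / d.get(k, dflt): first match)
def pvGet (d : List (String × String)) (k : String) : Option String :=
  (d.find? (fun p => p.1 == k)).map (·.2)

def pvGetD (d : List (String × String)) (k dflt : String) : String :=
  (pvGet d k).getD dflt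

-- row_data[i] if i < len(row_data) else ""   (same expression in both Pythons)
def pvRowVal (row_data : List String) (i : Int) : String :=
  if i < (row_data.length : Int) then PySem.List.pyGetD row_data i "" else ""

-- ===== PORT A =====
-- idx_map = {h.lower(): i for i, h in enumerate(header) if h}
def pvIdxMap (header : List String) : PySem.Dict String Int :=
  (PySem.List.enumerate header 0).foldl
    (fun d p => if p.2 ≠ "" then d.insert (PySem.Str.lower p.2) p.1 else d)
    PySem.Dict.empty

-- current_values = {h.lower(): row_data[i] if i < len(row_data) else "" for h, i in idx_map.items()}
def pvCV0 (row_data : List String) (header : List String) : PySem.Dict String String :=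
  (pvIdxMap header).items.foldl
    (fun d p => d.insert (PySem.Str.lower p.1) (pvRowVal row_data p.2))
    PySem.Dict.empty

-- the "Apply updates" loop of A
def pvCV (updates : List (List (String × String))) (row_data : List String) (header : List String) : PySem.Dict String String :=
  updates.foldl
    (fun d update =>
      let col := PySem.Str.lower (pvGetD update "column" "")
      let val := pvGetD update "value" ""
      if col ≠ "" then d.insert col val else d)
    (pvCV0 row_data header)

-- the body of A's "for event in events" loop (the if/elif chain), verbatim
def pvEventStep (acc : List (List (String × Option String))) (event : List (String × String)) : List (List (String × Option String)) :=
  let et := pvGet event "type"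
  if et = some "call_requested" then
    acc ++ [[("kind", some "action_needed"), ("reason", some "call_requested")]]
  else if et = some "needs_user_input" then
    let reason := pvGetD event "reason" "unclear"
    acc ++ [[("kind", some "action_needed"), ("reason", some ("needs_user_input:" ++ reason))]]
  else if et = some "property_unavailable" then
    acc ++ [[("kind", some "property_unavailable")]]
  else if et = some "new_property" then
    acc ++ [[("kind", some "action_needed"), ("reason", some "new_property_pending_send")]]
  else if et = some "contact_optout" then
    let reason := pvGetD event "reason" "not_interested"
    acc ++ [[("kind", some "action_needed"), ("reason", some ("contact_optout:" ++ reason))]]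
  else if et = some "wrong_contact" then
    let reason := pvGetD event "reason" "wrong_person"
    acc ++ [[("kind", some "action_needed"), ("reason", some ("wrong_contact:" ++ reason))]]
  else if et = some "tour_requested" then
    acc ++ [[("kind", some "action_needed"), ("reason", some "tour_requested")]]
  else if et = some "close_conversation" then
    acc ++ [[("kind", some "conversation_closed"), ("reason", some "natural_end")]]
  else if et = some "property_issue" then
    let severity := pvGetD event "severity" "major"
    acc ++ [[("kind", some "action_needed"), ("reason", some ("property_issue:" ++ severity))]]
  else acc

def derive_notifications (updates : List (List (String × String))) (events : List (List (String × String))) (row_data : List String) (header : List String) : List (List (String × Option String)) :=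
  let notifications : List (List (String × Option String)) :=
    updates.foldl (fun acc update =>
      acc ++ [[("kind", some "sheet_update"), ("column", pvGet update "column"), ("value", pvGet update "value")]]) []
  let notifications := events.foldl pvEventStep notifications
  let current_values := pvCV updates row_data header
  let required : List String := ["total sf", "ops ex /sf", "drive ins", "docks", "ceiling ht", "power"]
  let all_complete := required.all (fun f => !(PySem.Str.strip (current_values.getD f "") == ""))
  if all_complete && !updates.isEmpty then
    notifications ++ [[("kind", some "row_completed")]]
  else notifications

-- ===== PORT B =====
-- dispatch table: event type -> (kind, reason base or none, optional (param key, default))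
def pvEventSpecs : List (String × (String × Option String × Option (String × String))) :=
  [("call_requested", ("action_needed", some "call_requested", none)),
   ("needs_user_input", ("action_needed", some "needs_user_input:", some ("reason", "unclear"))),
   ("property_unavailable", ("property_unavailable", none, none)),
   ("new_property", ("action_needed", some "new_property_pending_send", none)),
   ("contact_optout", ("action_needed", some "contact_optout:", some ("reason", "not_interested"))),
   ("wrong_contact", ("action_needed", some "wrong_contact:", some ("reason", "wrong_person"))),
   ("tour_requested", ("action_needed", some "tour_requested", none)),
   ("close_conversation", ("conversation_closed", some "natural_end", none)),
   ("property_issue", ("action_needed", some "property_issue:", some ("severity", "major")))]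

def pvRequired : List String := ["total sf", "ops ex /sf", "drive ins", "docks", "ceiling ht", "power"]

def pvEventNotification (event : List (String × String)) : Option (List (String × Option String)) :=
  match pvGet event "type" with
  | none => none
  | some t =>
    match (pvEventSpecs.find? (fun p => p.1 == t)).map (·.2) with
    | none => none
    | some (kind, reasonBase, param) =>
      match reasonBase with
      | none => some [("kind", some kind)]
      | some rb =>
        let reason :=
          match param with
          | some (key, dflt) => rb ++ pvGetD event key dflt
          | none => rb
        some [("kind", some kind), ("reason", some reason)]

def pvFieldValue (field : String) (updates : List (List (String × String))) (row_data : List String) (header : List String) : String :=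
  let value := updates.foldl
    (fun b u => if PySem.Str.lower (pvGetD u "column" "") = field then some (pvGetD u "value" "") else b)
    none
  match value with
  | some v => v
  | none =>
    let idx := (PySem.List.enumerate header 0).foldl
      (fun b p => if p.2 ≠ "" ∧ PySem.Str.lower p.2 = field then some p.1 else b)
      none
    match idx with
    | none => ""
    | some i => pvRowVal row_data i

def derive_notifications_alt (updates : List (List (String × String))) (events : List (List (String × String))) (row_data : List String) (header : List String) : List (List (String × Option String)) :=
  let notifications := updates.map (fun u =>
    [("kind", some "sheet_update"), ("column", pvGet u "column"), ("value", pvGet u "value")])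
  let notifications := notifications ++ events.filterMap pvEventNotification
  if !updates.isEmpty && pvRequired.all (fun f => !(PySem.Str.strip (pvFieldValue f updates row_data header) == "")) then
    notifications ++ [[("kind", some "row_completed")]]
  else notifications

-- ===== PRECONDITION & SPEC =====
def Spec_derive_notifications (updates : List (List (String × String))) (events : List (List (String × String))) (row_data : List String) (header : List String) (out : List (List (String × Option String))) : Prop := out = derive_notifications_alt updates events row_data header
instance (updates : List (List (String × String))) (events : List (List (String × String))) (row_data : List String) (header : List String) (out : List (List (String × Option String))) : Decidable (Spec_derive_notifications updates events row_data header out) := by unfold Spec_derive_notifications; infer_instance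

-- ===== CLAIM (what is proved, stated in full; the proofs are below) =====
def Claim_equal_derive_notifications : Prop := ∀ (updates : List (List (String × String))) (events : List (List (String × String))) (row_data : List String) (header : List String), Dom_derive_notifications updates events row_data header → Spec_derive_notifications updates events row_data header (derive_notifications updates events row_data header)

-- ===== LEMMAS AND PROOFS =====

theorem pv_charOfNat_toNat (n : Nat) (h : n < 55296) : (Char.ofNat n).toNat = n := by
  have hv : Nat.isValidChar n := Or.inl h
  simp [Char.ofNat, hv]

theorem pv_char_le_iff (c d : Char) : c ≤ d ↔ c.toNat ≤ d.toNat := by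
  rw [Char.le_def]; exact UInt32.le_iff_toNat_le

theorem pv_lowerChar_idem (c : Char) : PySem.Chars.lowerChar (PySem.Chars.lowerChar c) = PySem.Chars.lowerChar c := by
  simp only [PySem.Chars.lowerChar, PySem.Chars.isupper, Bool.and_eq_true, decide_eq_true_eq]
  split_ifs with h1 h2
  · exfalso
    obtain ⟨ha, hb⟩ := h1
    obtain ⟨ha2, hb2⟩ := h2
    rw [pv_char_le_iff, show 'A'.toNat = 65 from rfl] at ha ha2
    rw [pv_char_le_iff, show 'Z'.toNat = 90 from rfl] at hb hb2
    rw [pv_charOfNat_toNat _ (by omega)] at hb2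
    omega
  · rfl
  · rfl

theorem pv_lower_idem (s : String) : PySem.Str.lower (PySem.Str.lower s) = PySem.Str.lower s := by
  refine String.toList_inj.mp ?_
  simp only [PySem.Str.toList_lower, PySem.Chars.lower, List.map_map]
  exact List.map_congr_left (fun c _ => pv_lowerChar_idem c)

-- a fold that only ever replaces the accumulator with `some _` stays `some` once it is
theorem pv_foldl_some_isSome {α V : Type} (P : α → Prop) [DecidablePred P] (v : α → V) :
    ∀ (l : List α) (b : Option V), b.isSome →
      (l.foldl (fun b a => if P a then some (v a) else b) b).isSome := by
  intro l
  induction l with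
  | nil => intro b hb; exact hb
  | cons a l ih =>
    intro b hb
    by_cases h : P a <;> simp [h] <;> [exact ih _ rfl; exact ih _ hb]

-- last-match reading of a guarded-insert loop, at get? level
theorem pv_foldl_insert_get? {α V : Type} (g : α → Prop) [DecidablePred g]
    (key : α → String) (val : α → V) (f : String) :
    ∀ (l : List α) (d : PySem.Dict String V) (b : Option V), (b = none ∨ b = d.get? f) →
      (l.foldl (fun d a => if g a then d.insert (key a) (val a) else d) d).get? f
        = (l.foldl (fun b a => if g a ∧ key a = f then some (val a) else b) b).or (d.get? f) := by
  intro l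
  induction l with
  | nil =>
    intro d b hb
    rcases hb with rfl | rfl
    · rfl
    · cases h : d.get? f <;> simp [h, Option.or]
  | cons a l ih =>
    intro d b hb
    by_cases hg : g a
    · by_cases hk : key a = f
      · have h1 : (d.insert (key a) (val a)).get? f = some (val a) := by
          rw [← hk]; exact PySem.Dict.get?_insert_self d (key a) (val a)
        have hih := ih (d.insert (key a) (val a)) (some (val a)) (Or.inr h1.symm)
        simp only [List.foldl_cons]
        rw [if_pos hg, if_pos (show g a ∧ key a = f from ⟨hg, hk⟩)]
        rw [hih, h1]
        have hs := pv_foldl_some_isSome (fun a => g a ∧ key a = f) val l (some (val a)) rfl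
        cases hres : l.foldl (fun b a => if g a ∧ key a = f then some (val a) else b) (some (val a)) with
        | none => rw [hres] at hs; simp at hs
        | some w => rfl
      · have h1 : (d.insert (key a) (val a)).get? f = d.get? f :=
          PySem.Dict.get?_insert_of_ne d (val a) (fun h => hk h.symm)
        have hb' : b = none ∨ b = (d.insert (key a) (val a)).get? f := by
          rcases hb with rfl | rfl
          · exact Or.inl rfl
          · exact Or.inr h1.symm
        have hih := ih (d.insert (key a) (val a)) b hb'
        simp only [List.foldl_cons]
        rw [if_pos hg, if_neg (fun h : g a ∧ key a = f => hk h.2)]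
        rw [hih, h1]
    · simp only [List.foldl_cons]
      rw [if_neg hg, if_neg (fun h : g a ∧ key a = f => hg h.1)]
      exact ih d b hb

-- keys of a guarded-insert loop stay Nodup
theorem pv_nodup_keys_foldl {α V : Type} (g : α → Prop) [DecidablePred g]
    (key : α → String) (val : α → V) :
    ∀ (l : List α) (d : PySem.Dict String V), d.keys.Nodup →
      (l.foldl (fun d a => if g a then d.insert (key a) (val a) else d) d).keys.Nodup := by
  intro l
  induction l with
  | nil => intro d hd; exact hd
  | cons a l ih =>
    intro d hd
    by_cases h : g a
    · simp only [List.foldl_cons, if_pos h]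
      exact ih _ (PySem.Dict.nodup_keys_insert d (key a) (val a) hd)
    · simp only [List.foldl_cons, if_neg h]
      exact ih _ hd

-- every key of idx_map is already lower-case
theorem pv_idxMap_keys_lower :
    ∀ (l : List (Int × String)) (d : PySem.Dict String Int),
      (∀ k ∈ d.keys, PySem.Str.lower k = k) →
      ∀ k ∈ (l.foldl (fun d p => if p.2 ≠ "" then d.insert (PySem.Str.lower p.2) p.1 else d) d).keys,
        PySem.Str.lower k = k := by
  intro l
  induction l with
  | nil => intro d hd; exact hd
  | cons p l ih =>
    intro d hd
    by_cases h : p.2 ≠ ""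
    · simp only [List.foldl_cons, if_pos h]
      refine ih _ ?_
      intro k hk
      rcases (PySem.Dict.mem_keys_insert d (PySem.Str.lower p.2) k p.1).mp hk with rfl | hk'
      · exact pv_lower_idem p.2
      · exact hd k hk'
    · simp only [List.foldl_cons, if_neg h]
      exact ih _ hd

-- a no-further-match fold keeps its accumulator
theorem pv_foldl_nomatch {V W : Type} (f : String) (w : V → W) :
    ∀ (l : List (String × V)) (b : Option W), (∀ p ∈ l, p.1 ≠ f) →
      l.foldl (fun b p => if p.1 = f then some (w p.2) else b) b = b := by
  intro l
  induction l with
  | nil => intro b _; rfl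
  | cons p l ih =>
    intro b h
    simp only [List.foldl_cons, if_neg (h p (by simp))]
    exact ih _ (fun q hq => h q (by simp [hq]))

-- last-match scan over the items of a Nodup dict is its lookup
theorem pv_items_scan {V W : Type} (f : String) (w : V → W) :
    ∀ (l : List (String × V)), (l.map Prod.fst).Nodup →
      l.foldl (fun b p => if p.1 = f then some (w p.2) else b) none
        = ((PySem.Dict.mk l).get? f).map w := by
  intro l
  induction l with
  | nil => simp [PySem.Dict.get?]
  | cons p l ih =>
    intro hnd
    simp only [List.map_cons, List.nodup_cons] at hnd
    by_cases h : p.1 = f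
    · simp only [List.foldl_cons, if_pos h]
      have hno : ∀ q ∈ l, q.1 ≠ f := by
        intro q hq hqf
        apply hnd.1
        have : q.1 ∈ l.map Prod.fst := List.mem_map_of_mem hq
        rw [hqf, ← h] at this
        exact this
      rw [pv_foldl_nomatch f w l (some (w p.2)) hno]
      rw [PySem.Dict.get?_mk_cons]
      simp [h]
    · simp only [List.foldl_cons, if_neg h]
      rw [ih hnd.2, PySem.Dict.get?_mk_cons]
      simp [h]

-- the six required field literals are non-empty and lower-case
theorem pv_required_fields (f : String) (hf : f ∈ pvRequired) : f ≠ "" := by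
  simp only [pvRequired, List.mem_cons, List.not_mem_nil, or_false] at hf
  rcases hf with rfl | rfl | rfl | rfl | rfl | rfl <;> decide

-- A's event if/elif chain produces exactly B's table-driven notification
theorem pv_event_step (acc : List (List (String × Option String))) (e : List (String × String)) :
    pvEventStep acc e = acc ++ (pvEventNotification e).toList := by
  unfold pvEventStep pvEventNotification
  cases pvGet e "type" with
  | none => simp
  | some t =>
    by_cases h1 : t = "call_requested"
    · subst h1; simp [pvEventSpecs]
    by_cases h2 : t = "needs_user_input"
    · subst h2; simp [pvEventSpecs]
    by_cases h3 : t = "property_unavailable"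
    · subst h3; simp [pvEventSpecs]
    by_cases h4 : t = "new_property"
    · subst h4; simp [pvEventSpecs]
    by_cases h5 : t = "contact_optout"
    · subst h5; simp [pvEventSpecs]
    by_cases h6 : t = "wrong_contact"
    · subst h6; simp [pvEventSpecs]
    by_cases h7 : t = "tour_requested"
    · subst h7; simp [pvEventSpecs]
    by_cases h8 : t = "close_conversation"
    · subst h8; simp [pvEventSpecs]
    by_cases h9 : t = "property_issue"
    · subst h9; simp [pvEventSpecs]
    simp [pvEventSpecs, h1, h2, h3, h4, h5, h6, h7, h8, h9,
      Ne.symm h1, Ne.symm h2, Ne.symm h3, Ne.symm h4, Ne.symm h5,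
      Ne.symm h6, Ne.symm h7, Ne.symm h8, Ne.symm h9]

theorem pv_events_fold (evs : List (List (String × String))) :
    ∀ acc, evs.foldl pvEventStep acc = acc ++ evs.filterMap pvEventNotification := by
  induction evs with
  | nil => intro acc; simp
  | cons e evs ih =>
    intro acc
    rw [List.foldl_cons, ih, pv_event_step]
    cases h : pvEventNotification e <;> simp [h]

theorem pv_all_congr (xs : List String) (p q : String → Bool) (h : ∀ f ∈ xs, p f = q f) :
    xs.all p = xs.all q := by
  induction xs with
  | nil => rfl
  | cons x xs ih => simp only [List.all_cons, h x (by simp), ih (fun f hf => h f (by simp [hf]))]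

-- per-field: A's dict chain agrees with B's direct resolver
theorem pv_field_eq (f : String) (hf : f ≠ "")
    (updates : List (List (String × String))) (row_data header : List String) :
    (pvCV updates row_data header).getD f "" = pvFieldValue f updates row_data header := by
  -- Step 3: idx_map lookup = B's header scan
  have h3 : (pvIdxMap header).get? f
      = (PySem.List.enumerate header 0).foldl
          (fun b p => if p.2 ≠ "" ∧ PySem.Str.lower p.2 = f then some p.1 else b) none := by
    have hg := pv_foldl_insert_get? (fun p : Int × String => p.2 ≠ "")
      (fun p => PySem.Str.lower p.2) (fun p => p.1) f
      (PySem.List.enumerate header 0) PySem.Dict.empty none (Or.inl rfl)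
    exact hg.trans (by rw [PySem.Dict.get?_empty, Option.or_none])
  -- nodup keys of idx_map
  have hnd : (pvIdxMap header).keys.Nodup := by
    have := pv_nodup_keys_foldl (fun p : Int × String => p.2 ≠ "")
      (fun p => PySem.Str.lower p.2) (fun p => p.1)
      (PySem.List.enumerate header 0) PySem.Dict.empty (by simp [pysem])
    exact this
  -- keys of idx_map are lower-case
  have hlow : ∀ k ∈ (pvIdxMap header).keys, PySem.Str.lower k = k := by
    have := pv_idxMap_keys_lower (PySem.List.enumerate header 0) PySem.Dict.empty
      (by intro k hk; simp [pysem] at hk)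
    exact this
  -- Step 2: cv0 lookup = idx_map lookup mapped through pvRowVal
  have h2 : (pvCV0 row_data header).get? f
      = ((pvIdxMap header).get? f).map (pvRowVal row_data) := by
    have hg := pv_foldl_insert_get? (fun _ : String × Int => True)
      (fun p => PySem.Str.lower p.1) (fun p => pvRowVal row_data p.2) f
      (pvIdxMap header).items PySem.Dict.empty none (Or.inl rfl)
    have hcv0 : (pvCV0 row_data header).get? f
        = ((pvIdxMap header).items.foldl
            (fun b p => if True ∧ PySem.Str.lower p.1 = f then some (pvRowVal row_data p.2) else b)
            none) := by
      exact hg.trans (by rw [PySem.Dict.get?_empty, Option.or_none])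
    rw [hcv0]
    have hcong : (pvIdxMap header).items.foldl
        (fun b p => if True ∧ PySem.Str.lower p.1 = f then some (pvRowVal row_data p.2) else b) none
        = (pvIdxMap header).items.foldl
            (fun b p => if p.1 = f then some (pvRowVal row_data p.2) else b) none := by
      apply PySem.List.foldl_congr_mem
      intro b p hp
      have hk : PySem.Str.lower p.1 = p.1 :=
        hlow p.1 (PySem.Dict.mem_keys_of_mem_items _ hp)
      by_cases hpf : p.1 = f
      · rw [if_pos ⟨trivial, by rw [hk]; exact hpf⟩, if_pos hpf]
      · rw [if_neg (fun hh => hpf (by rw [← hk]; exact hh.2)), if_neg hpf]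
    rw [hcong]
    have hmk : PySem.Dict.mk (pvIdxMap header).items = pvIdxMap header := PySem.Dict.ext rfl
    rw [pv_items_scan f (pvRowVal row_data) (pvIdxMap header).items (by exact hnd), hmk]
  -- Step 1: final dict lookup = B's update scan with cv0 fallback
  have h1 : (pvCV updates row_data header).get? f
      = (updates.foldl
          (fun b u => if PySem.Str.lower (pvGetD u "column" "") ≠ "" ∧ PySem.Str.lower (pvGetD u "column" "") = f
                      then some (pvGetD u "value" "") else b) none).or
        ((pvCV0 row_data header).get? f) := by
    have := pv_foldl_insert_get? (fun u => PySem.Str.lower (pvGetD u "column" "") ≠ "")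
      (fun u => PySem.Str.lower (pvGetD u "column" "")) (fun u => pvGetD u "value" "") f
      updates (pvCV0 row_data header) none (Or.inl rfl)
    exact this
  have hfn : updates.foldl
        (fun b u => if PySem.Str.lower (pvGetD u "column" "") ≠ "" ∧ PySem.Str.lower (pvGetD u "column" "") = f
                    then some (pvGetD u "value" "") else b) none
      = updates.foldl
        (fun b u => if PySem.Str.lower (pvGetD u "column" "") = f
                    then some (pvGetD u "value" "") else b) none := by
    apply PySem.List.foldl_congr_mem
    intro b u _
    by_cases hk : PySem.Str.lower (pvGetD u "column" "") = f
    · rw [if_pos ⟨by rw [hk]; exact hf, hk⟩, if_pos hk]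
    · rw [if_neg (fun hh => hk hh.2), if_neg hk]
  rw [PySem.Dict.getD_eq_get?_getD, h1, hfn, h2, h3]
  unfold pvFieldValue
  cases hu : updates.foldl
      (fun b u => if PySem.Str.lower (pvGetD u "column" "") = f then some (pvGetD u "value" "") else b)
      none with
  | some v => simp [Option.or]
  | none =>
    cases hh : (PySem.List.enumerate header 0).foldl
        (fun b p => if p.2 ≠ "" ∧ PySem.Str.lower p.2 = f then some p.1 else b) none <;>
      simp [Option.or]

-- ===== VERDICT (by name: the statement is the Claim_ definition above) =====
theorem derive_notifications_spec : Claim_equal_derive_notifications := by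
  intro updates events row_data header _
  have hall : (["total sf", "ops ex /sf", "drive ins", "docks", "ceiling ht", "power"] : List String).all
        (fun f => !(PySem.Str.strip ((pvCV updates row_data header).getD f "") == ""))
      = pvRequired.all
        (fun f => !(PySem.Str.strip (pvFieldValue f updates row_data header) == "")) := by
    show pvRequired.all _ = pvRequired.all _
    apply pv_all_congr
    intro f hf
    rw [pv_field_eq f (pv_required_fields f hf)]
  simp only [Spec_derive_notifications, derive_notifications, derive_notifications_alt,
    PySem.List.foldl_append_singleton_eq_map, List.nil_append, pv_events_fold]
  rw [hall, Bool.and_comm]
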